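-- pv_equiv track=rewrite | github.com/Suk1412/NexlifyAPP | test/ceshi.py | decode_access_bits
-- ===== SOURCE A (Python) =====
-- def decode_access_bits(ac_bytes):
--     ac0, ac1, ac2 = ac_bytes  # Byte 6, 7, 8
--
--     c1 = ((ac1 & 0x10) >> 4) | ((ac1 & 0x01) << 1) | ((ac0 & 0x10) >> 2) | ((ac0 & 0x01) << 2)
--     c2 = ((ac1 & 0x20) >> 5) | ((ac1 & 0x02))      | ((ac0 & 0x20) >> 3) | ((ac0 & 0x02) << 1)
--     c3 = ((ac1 & 0x40) >> 6) | ((ac1 & 0x04) << 1) | ((ac0 & 0x40) >> 4) | ((ac0 & 0x04) << 2)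
--
--     # 每两位为一个 block 的 (C1,C2,C3)，block 0~3
--     blocks = []
--     for i in range(4):
--         C1 = (c1 >> i) & 1
--         C2 = (c2 >> i) & 1
--         C3 = (c3 >> i) & 1
--         blocks.append((C1, C2, C3))
--     return blocks
-- ===== SOURCE B (Python) =====
-- def decode_access_bits(ac_bytes):
--     ac0, ac1, ac2 = ac_bytes  # Byte 6, 7, 8
--
--     # Bit-relocation layout: each nibble is assembled from (source_byte, source_bit, dest_bit) moves.
--     layout = [
--         [(ac1, 4, 0), (ac1, 0, 1), (ac0, 4, 2), (ac0, 0, 2)],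
--         [(ac1, 5, 0), (ac1, 1, 1), (ac0, 5, 2), (ac0, 1, 2)],
--         [(ac1, 6, 0), (ac1, 2, 3), (ac0, 6, 2), (ac0, 2, 4)],
--     ]
--     nibbles = []
--     for row in layout:
--         c = 0
--         for src, sb, db in row:
--             c |= ((src >> sb) & 1) << db
--         nibbles.append(c)
--     n1, n2, n3 = nibbles
--
--     return [((n1 >> i) & 1, (n2 >> i) & 1, (n3 >> i) & 1) for i in range(4)]
-- ===== Notes on version B (the rewrite author's own statement) =====
-- stated objective: alternative
-- what changed: B replaces A's three hand-fused mask/shift expressions and append loop with a data table of (source, source_bit, dest_bit) moves folded by one generic bit-relocation loop, plus a comprehension extracting the per-block bits; Pre_ excludes lists whose length is not 3, on which A's tuple unpack raises ValueError.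
import Mathlib
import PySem

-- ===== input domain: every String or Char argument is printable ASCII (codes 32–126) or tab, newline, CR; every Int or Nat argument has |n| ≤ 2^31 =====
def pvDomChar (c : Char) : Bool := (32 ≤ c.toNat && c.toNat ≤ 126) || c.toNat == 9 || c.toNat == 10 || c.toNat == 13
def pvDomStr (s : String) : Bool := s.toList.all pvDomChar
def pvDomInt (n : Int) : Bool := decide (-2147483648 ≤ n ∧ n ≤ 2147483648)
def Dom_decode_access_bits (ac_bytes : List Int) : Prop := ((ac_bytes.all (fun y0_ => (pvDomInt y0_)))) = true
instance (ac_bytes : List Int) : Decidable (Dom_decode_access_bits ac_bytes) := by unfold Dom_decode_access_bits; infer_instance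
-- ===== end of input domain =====

-- B assembles the three nibbles from a data table of (source, source_bit, dest_bit) moves folded with a generic bit-relocation loop, instead of A's hand-fused mask/shift expressions (objective: alternative).

-- ===== PORT A =====
def decode_access_bits (ac_bytes : List Int) : List (Int × Int × Int) :=
  match ac_bytes with
  | [ac0, ac1, _ac2] =>
    let c1 := PySem.Int.bor (PySem.Int.bor (PySem.Int.bor ((PySem.Int.band ac1 0x10) >>> (4:Int)) ((PySem.Int.band ac1 0x01) <<< (1:Int))) ((PySem.Int.band ac0 0x10) >>> (2:Int))) ((PySem.Int.band ac0 0x01) <<< (2:Int))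
    let c2 := PySem.Int.bor (PySem.Int.bor (PySem.Int.bor ((PySem.Int.band ac1 0x20) >>> (5:Int)) (PySem.Int.band ac1 0x02)) ((PySem.Int.band ac0 0x20) >>> (3:Int))) ((PySem.Int.band ac0 0x02) <<< (1:Int))
    let c3 := PySem.Int.bor (PySem.Int.bor (PySem.Int.bor ((PySem.Int.band ac1 0x40) >>> (6:Int)) ((PySem.Int.band ac1 0x04) <<< (1:Int))) ((PySem.Int.band ac0 0x40) >>> (4:Int))) ((PySem.Int.band ac0 0x04) <<< (2:Int))
    (PySem.List.pyRange 0 4 1).foldl (fun blocks i =>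
      blocks ++ [(PySem.Int.band (c1 >>> i) 1, PySem.Int.band (c2 >>> i) 1, PySem.Int.band (c3 >>> i) 1)]) []
  | _ => []  -- tuple unpack raises ValueError here: outside Pre_

-- ===== PORT B =====
def decode_access_bits_alt (ac_bytes : List Int) : List (Int × Int × Int) :=
  if ac_bytes.length = 3 then   -- `ac0, ac1, ac2 = ac_bytes` unpack; getD is exact since the length is 3
    let ac0 := ac_bytes.getD 0 0
    let ac1 := ac_bytes.getD 1 0
    let layout : List (List (Int × Int × Int)) :=
      [[(ac1, 4, 0), (ac1, 0, 1), (ac0, 4, 2), (ac0, 0, 2)],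
       [(ac1, 5, 0), (ac1, 1, 1), (ac0, 5, 2), (ac0, 1, 2)],
       [(ac1, 6, 0), (ac1, 2, 3), (ac0, 6, 2), (ac0, 2, 4)]]
    let nibbles := layout.foldl (fun ns row =>
      ns ++ [row.foldl (fun c t => PySem.Int.bor c ((PySem.Int.band (t.1 >>> t.2.1) 1) <<< t.2.2)) 0]) []
    -- `n1, n2, n3 = nibbles` unpack; getD is exact since the fold over the 3-row layout yields 3 nibbles
    let n1 := nibbles.getD 0 0
    let n2 := nibbles.getD 1 0
    let n3 := nibbles.getD 2 0
    (PySem.List.pyRange 0 4 1).map (fun i =>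
      (PySem.Int.band (n1 >>> i) 1, PySem.Int.band (n2 >>> i) 1, PySem.Int.band (n3 >>> i) 1))
  else []  -- tuple unpack raises ValueError here: outside Pre_

-- ===== PRECONDITION & SPEC =====
-- Pre_ : the Python unpack `ac0, ac1, ac2 = ac_bytes` raises ValueError unless the list has exactly 3 elements.
def Pre_decode_access_bits (ac_bytes : List Int) : Prop := ac_bytes.length = 3
instance (ac_bytes : List Int) : Decidable (Pre_decode_access_bits ac_bytes) := by unfold Pre_decode_access_bits; infer_instance
def pvWitness_decode_access_bits : List Int := [255, 7, 128]

def Spec_decode_access_bits (ac_bytes : List Int) (out : List (Int × Int × Int)) : Prop := out = decode_access_bits_alt ac_bytes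
instance (ac_bytes : List Int) (out : List (Int × Int × Int)) : Decidable (Spec_decode_access_bits ac_bytes out) := by unfold Spec_decode_access_bits; infer_instance

-- ===== CLAIM (what is proved, stated in full; the proofs are below) =====
def Claim_equal_decode_access_bits : Prop := ∀ (ac_bytes : List Int), Dom_decode_access_bits ac_bytes → Pre_decode_access_bits ac_bytes → Spec_decode_access_bits ac_bytes (decode_access_bits ac_bytes)

-- ===== LEMMAS AND PROOFS =====

theorem pv_nat_band_pow (n i : Nat) : n &&& 2^i = 2^i * (n / 2^i % 2) := by
  rw [Nat.and_two_pow, Nat.testBit_eq_decide_div_mod_eq]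
  by_cases h : n / 2^i % 2 = 1
  · simp [h]
  · have h0 : n / 2^i % 2 = 0 := by omega
    simp [h0]

theorem pv_band_pow (x : Int) (i : Nat) : PySem.Int.band x (2^i) = 2^i * (x / 2^i % 2) := by
  have hnn : (0:Int) ≤ 2^i := by positivity
  have hc : (0:Int) < 2^i := by positivity
  have ht : ((2:Int)^i).toNat = 2^i := by
    rw [show ((2:Int)^i) = ((2^i : Nat) : Int) by push_cast; ring, Int.toNat_natCast]
  unfold PySem.Int.band
  by_cases hx : 0 ≤ x
  · rw [if_pos hx, if_pos hnn, ht, pv_nat_band_pow]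
    push_cast
    rw [Int.toNat_of_nonneg hx]
  · rw [if_neg hx, if_pos hnn, ht, Nat.and_comm, pv_nat_band_pow]
    set m : Nat := (-x - 1).toNat with hm
    have hxm : x = -(m:Int) - 1 := by
      have : ((-x - 1).toNat : Int) = -x - 1 := Int.toNat_of_nonneg (by omega)
      omega
    have hq := Nat.div_add_mod m (2^i)
    have hrlt : m % 2^i < 2^i := Nat.mod_lt _ (by positivity)
    obtain ⟨hdiv, -⟩ := (Int.ediv_emod_unique (a:=x) (b:=2^i)
        (r:=((2:Int)^i - ((m % 2^i : Nat) : Int) - 1)) (q:=-((m / 2^i : Nat) : Int) - 1) hc).mpr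
      ⟨by push_cast at hq ⊢; nlinarith [hq], by push_cast; omega, by push_cast; omega⟩
    rw [hdiv]
    by_cases h2 : m / 2^i % 2 = 0
    · have h3 : (-((m / 2^i : Nat) : Int) - 1) % 2 = 1 := by omega
      rw [h2, h3]; simp
    · have h1 : m / 2^i % 2 = 1 := by omega
      have h3 : (-((m / 2^i : Nat) : Int) - 1) % 2 = 0 := by omega
      rw [h1, h3]; simp

theorem pv_shrI (x : Int) (k : Nat) : x >>> (k:Int) = x / 2^k := by
  rw [Int.shiftRight_natCast_right, Int.shiftRight_eq_div_pow]; push_cast; ring_nf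

theorem pv_shlI (x : Int) (k : Nat) : x <<< (k:Int) = x * 2^k := by
  rw [Int.shiftLeft_eq_mul_pow]; push_cast; ring

theorem pv_band1 (x : Int) : PySem.Int.band x 1 = x % 2 := by
  have h := pv_band_pow x 0; norm_num at h; exact h
theorem pv_band2 (x : Int) : PySem.Int.band x 2 = 2 * (x / 2 % 2) := by
  have h := pv_band_pow x 1; norm_num at h; exact h
theorem pv_band4 (x : Int) : PySem.Int.band x 4 = 4 * (x / 4 % 2) := by
  have h := pv_band_pow x 2; norm_num at h; exact h
theorem pv_band16 (x : Int) : PySem.Int.band x 16 = 16 * (x / 16 % 2) := by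
  have h := pv_band_pow x 4; norm_num at h; exact h
theorem pv_band32 (x : Int) : PySem.Int.band x 32 = 32 * (x / 32 % 2) := by
  have h := pv_band_pow x 5; norm_num at h; exact h
theorem pv_band64 (x : Int) : PySem.Int.band x 64 = 64 * (x / 64 % 2) := by
  have h := pv_band_pow x 6; norm_num at h; exact h

theorem pv_shr0 (x : Int) : x >>> (0:Int) = x := by have h := pv_shrI x 0; norm_num at h; exact h
theorem pv_shr1 (x : Int) : x >>> (1:Int) = x / 2 := by have h := pv_shrI x 1; norm_num at h; exact h
theorem pv_shr2 (x : Int) : x >>> (2:Int) = x / 4 := by have h := pv_shrI x 2; norm_num at h; exact h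
theorem pv_shr3 (x : Int) : x >>> (3:Int) = x / 8 := by have h := pv_shrI x 3; norm_num at h; exact h
theorem pv_shr4 (x : Int) : x >>> (4:Int) = x / 16 := by have h := pv_shrI x 4; norm_num at h; exact h
theorem pv_shr5 (x : Int) : x >>> (5:Int) = x / 32 := by have h := pv_shrI x 5; norm_num at h; exact h
theorem pv_shr6 (x : Int) : x >>> (6:Int) = x / 64 := by have h := pv_shrI x 6; norm_num at h; exact h
theorem pv_shl0 (x : Int) : x <<< (0:Int) = x := by have h := pv_shlI x 0; norm_num at h; exact h
theorem pv_shl1 (x : Int) : x <<< (1:Int) = x * 2 := by have h := pv_shlI x 1; norm_num at h; exact h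
theorem pv_shl2 (x : Int) : x <<< (2:Int) = x * 4 := by have h := pv_shlI x 2; norm_num at h; exact h
theorem pv_shl3 (x : Int) : x <<< (3:Int) = x * 8 := by have h := pv_shlI x 3; norm_num at h; exact h
theorem pv_shl4 (x : Int) : x <<< (4:Int) = x * 16 := by have h := pv_shlI x 4; norm_num at h; exact h

theorem pv_range4 : PySem.List.pyRange 0 4 1 = [0, 1, 2, 3] := by decide

theorem pv_main (a0 a1 a2 : Int) :
    decode_access_bits [a0, a1, a2] = decode_access_bits_alt [a0, a1, a2] := by
  simp only [decode_access_bits, decode_access_bits_alt, pv_range4, List.foldl_cons,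
    List.foldl_nil, List.map_cons, List.map_nil, List.nil_append, List.cons_append,
    List.getD_cons_zero, List.getD_cons_succ,
    pv_band1, pv_band2, pv_band4, pv_band16, pv_band32, pv_band64,
    pv_shr0, pv_shr1, pv_shr2, pv_shr3, pv_shr4, pv_shr5, pv_shr6,
    pv_shl0, pv_shl1, pv_shl2, pv_shl3, pv_shl4]
  rw [if_pos (show ([a0, a1, a2] : List Int).length = 3 from rfl)]
  simp only [List.cons.injEq, Prod.mk.injEq, and_true]
  refine ⟨⟨?_, ?_, ?_⟩, ⟨?_, ?_, ?_⟩, ⟨?_, ?_, ?_⟩, ⟨?_, ?_, ?_⟩⟩ <;>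
  · first
    | (have hx : a1 / 16 % 2 = 0 ∨ a1 / 16 % 2 = 1 := by omega
       have hy : a1 % 2 = 0 ∨ a1 % 2 = 1 := by omega
       have hz : a0 / 16 % 2 = 0 ∨ a0 / 16 % 2 = 1 := by omega
       have hw : a0 % 2 = 0 ∨ a0 % 2 = 1 := by omega
       rcases hx with hx|hx <;> rcases hy with hy|hy <;> rcases hz with hz|hz <;>
         rcases hw with hw|hw <;> rw [hx, hy, hz, hw] <;> decide)
    | (have hx : a1 / 32 % 2 = 0 ∨ a1 / 32 % 2 = 1 := by omega
       have hy : a1 / 2 % 2 = 0 ∨ a1 / 2 % 2 = 1 := by omega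
       have hz : a0 / 32 % 2 = 0 ∨ a0 / 32 % 2 = 1 := by omega
       have hw : a0 / 2 % 2 = 0 ∨ a0 / 2 % 2 = 1 := by omega
       rcases hx with hx|hx <;> rcases hy with hy|hy <;> rcases hz with hz|hz <;>
         rcases hw with hw|hw <;> rw [hx, hy, hz, hw] <;> decide)
    | (have hx : a1 / 64 % 2 = 0 ∨ a1 / 64 % 2 = 1 := by omega
       have hy : a1 / 4 % 2 = 0 ∨ a1 / 4 % 2 = 1 := by omega
       have hz : a0 / 64 % 2 = 0 ∨ a0 / 64 % 2 = 1 := by omega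
       have hw : a0 / 4 % 2 = 0 ∨ a0 / 4 % 2 = 1 := by omega
       rcases hx with hx|hx <;> rcases hy with hy|hy <;> rcases hz with hz|hz <;>
         rcases hw with hw|hw <;> rw [hx, hy, hz, hw] <;> decide)

-- ===== VERDICT (by name: the statement is the Claim_ definition above) =====
theorem decode_access_bits_spec : Claim_equal_decode_access_bits := by
  intro ac_bytes _ hpre
  unfold Spec_decode_access_bits
  match ac_bytes, hpre with
  | [a0, a1, a2], _ => exact pv_main a0 a1 a2
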